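-- pv_equiv track=rewrite | github.com/NeapolitanIcecream/cremona | src/cremona/core/engine.py | _count_dead_code_candidates
-- ===== SOURCE A (Python) =====
-- from typing import Any, Callable, Iterable, Literal
--
-- def _count_dead_code_candidates(
--     file_dead_code: list[dict[str, Any]],
-- ) -> tuple[int, int]:
--     high_confidence_dead_code = sum(
--         1
--         for item in file_dead_code
--         if item["classification"] == "high_confidence_candidate"
--     )
--     review_candidate_dead_code = sum(
--         1 for item in file_dead_code if item["classification"] == "review_candidate"
--     )
--     return (high_confidence_dead_code, review_candidate_dead_code)
-- ===== SOURCE B (Python) =====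
-- def _count_dead_code_candidates(file_dead_code):
--     counts = {}
--     for item in file_dead_code:
--         label = item["classification"]
--         counts[label] = counts.get(label, 0) + 1
--     return (
--         counts.get("high_confidence_candidate", 0),
--         counts.get("review_candidate", 0),
--     )
-- ===== Notes on version B (the rewrite author's own statement) =====
-- stated objective: idiomatic
-- what changed: Replaces A's two separate filtered sums (two passes over the list) by a single pass that builds a dict of counts per classification label, followed by two lookups.
import Mathlib
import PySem

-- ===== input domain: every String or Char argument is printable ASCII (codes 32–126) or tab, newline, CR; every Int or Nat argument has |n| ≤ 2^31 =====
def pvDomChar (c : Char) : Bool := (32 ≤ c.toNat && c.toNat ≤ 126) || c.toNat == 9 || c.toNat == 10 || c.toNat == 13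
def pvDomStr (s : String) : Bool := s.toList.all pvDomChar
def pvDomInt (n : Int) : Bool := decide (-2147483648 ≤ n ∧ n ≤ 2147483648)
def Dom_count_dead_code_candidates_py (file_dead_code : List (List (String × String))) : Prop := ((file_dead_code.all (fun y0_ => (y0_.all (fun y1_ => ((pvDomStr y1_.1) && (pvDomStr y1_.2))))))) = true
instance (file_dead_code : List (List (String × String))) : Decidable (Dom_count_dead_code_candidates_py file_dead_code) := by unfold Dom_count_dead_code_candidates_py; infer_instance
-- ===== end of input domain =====

-- B replaces A's two filtered sums (two passes) by one pass building a dict of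
-- per-label counts followed by two lookups (objective: idiomatic).

-- ===== PORT A =====
-- item["classification"] on an association list (first match = Python dict lookup)
def clsOf (item : List (String × String)) : Option String :=
  (PySem.Dict.ofList item).get? "classification"

def count_dead_code_candidates_py (file_dead_code : List (List (String × String))) : Int × Int :=
  let high := file_dead_code.foldl
    (fun a item => if clsOf item = some "high_confidence_candidate" then a + 1 else a) (0 : Int)
  let review := file_dead_code.foldl
    (fun a item => if clsOf item = some "review_candidate" then a + 1 else a) (0 : Int)
  (high, review)

-- ===== PORT B =====
def count_dead_code_candidates_py_alt (file_dead_code : List (List (String × String))) : Int × Int :=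
  let counts := file_dead_code.foldl
    (fun d item =>
      match clsOf item with
      | some label => d.insert label (d.getD label 0 + 1)
      | none => d)   -- unreachable under Pre_ (Python raises KeyError there)
    (PySem.Dict.empty : PySem.Dict String Int)
  (counts.getD "high_confidence_candidate" 0, counts.getD "review_candidate" 0)

-- ===== PRECONDITION & SPEC =====
-- Pre_ excludes exactly the items lacking a "classification" key, on which Python A raises KeyError.
def Pre_count_dead_code_candidates_py (file_dead_code : List (List (String × String))) : Prop :=
  (file_dead_code.all (fun item => (PySem.Dict.ofList item).contains "classification")) = true
instance (file_dead_code : List (List (String × String))) : Decidable (Pre_count_dead_code_candidates_py file_dead_code) := by unfold Pre_count_dead_code_candidates_py; infer_instance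

def pvWitness_count_dead_code_candidates_py : (List (List (String × String))) :=
  [[("classification", "high_confidence_candidate")], [("classification", "other")]]

def Spec_count_dead_code_candidates_py (file_dead_code : List (List (String × String))) (out : Int × Int) : Prop := out = count_dead_code_candidates_py_alt file_dead_code
instance (file_dead_code : List (List (String × String))) (out : Int × Int) : Decidable (Spec_count_dead_code_candidates_py file_dead_code out) := by unfold Spec_count_dead_code_candidates_py; infer_instance

-- ===== CLAIM (what is proved, stated in full; the proofs are below) =====
def Claim_equal_count_dead_code_candidates_py : Prop := ∀ (file_dead_code : List (List (String × String))), Dom_count_dead_code_candidates_py file_dead_code → Pre_count_dead_code_candidates_py file_dead_code → Spec_count_dead_code_candidates_py file_dead_code (count_dead_code_candidates_py file_dead_code)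

-- ===== LEMMAS AND PROOFS =====

-- A's filtered sum counts occurrences of l among the labels.
lemma foldA_count (l : String) (xs : List (List (String × String))) (a : Int) :
    xs.foldl (fun a item => if clsOf item = some l then a + 1 else a) a
      = a + ((xs.filterMap clsOf).count l : Int) := by
  induction xs generalizing a with
  | nil => simp
  | cons x xs ih =>
    simp only [List.foldl_cons, List.filterMap_cons]
    cases h : clsOf x with
    | none =>
      have : ¬ clsOf x = some l := by simp [h]
      simp [this, ih]
    | some s =>
      by_cases hs : s = l
      · subst hs
        simp [h, ih, List.count_cons]
        ring
      · have : ¬ clsOf x = some l := by simp [h, hs]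
        simp [this, ih, List.count_cons, hs, h]

-- B's fold is the counter fold over the label list.
lemma foldB_eq (xs : List (List (String × String))) (d : PySem.Dict String Int) :
    xs.foldl
      (fun d item =>
        match clsOf item with
        | some label => d.insert label (d.getD label 0 + 1)
        | none => d) d
      = (xs.filterMap clsOf).foldl (fun d x => d.insert x (d.getD x 0 + 1)) d := by
  induction xs generalizing d with
  | nil => rfl
  | cons x xs ih =>
    simp only [List.foldl_cons, List.filterMap_cons]
    cases h : clsOf x <;> simp [h, ih]

lemma alt_getD (l : String) (xs : List (List (String × String))) :
    (xs.foldl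
      (fun d item =>
        match clsOf item with
        | some label => d.insert label (d.getD label 0 + 1)
        | none => d)
      (PySem.Dict.empty : PySem.Dict String Int)).getD l 0
      = ((xs.filterMap clsOf).count l : Int) := by
  rw [foldB_eq, PySem.Dict.foldl_insert_getD_add_one_eq_counter, PySem.Dict.getD_counter]

-- ===== VERDICT (by name: the statement is the Claim_ definition above) =====
theorem count_dead_code_candidates_py_spec : Claim_equal_count_dead_code_candidates_py := by
  intro fdc _ _
  unfold Spec_count_dead_code_candidates_py count_dead_code_candidates_py count_dead_code_candidates_py_alt
  simp only [alt_getD, foldA_count, zero_add]
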